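-- pv_equiv track=rewrite | github.com/lesh23/Practice | test_practice/Lv0.py | solution
-- ===== SOURCE A (Python) =====
-- def solution(board):
--     answer = 0
--     di = [-1,-1,-1,0,0,1,1,1]
--     dj = [-1,0,1,-1,1,-1,0,1]
--     danger = []
--     # 위험지역 찾기
--     for i in range(len(board)):
--         for j in range(len(board)) :
--             if board[i][j] == 1:
--                 danger.append([i,j])
--     # 위험지역 근처 1로 바꾸기
--     for p in range(len(di)):
--         for x,y in danger:
--             x += di[p]
--             y += dj[p]
--             if x in range(len(board)) and y in range(len(board)) :
--                 board[x][y] = 1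
--     # 답 찾기 : 0의 개수 세기
--     for i in board:
--         answer += i.count(0)
--     return answer
-- ===== SOURCE B (Python) =====
-- def solution(board):
--     n = len(board)
--     mines = {(i, j) for i in range(n) for j in range(n) if board[i][j] == 1}
--     answer = 0
--     for i in range(n):
--         row = board[i]
--         for j in range(n):
--             if any((i + a, j + b) in mines for a in (-1, 0, 1) for b in (-1, 0, 1)):
--                 row[j] = 1
--         answer += row.count(0)
--     return answer
-- ===== Notes on version B (the rewrite author's own statement) =====
-- stated objective: alternative
-- what changed: Replaces A's scatter (collect mine list, then 8 direction-passes marking each mine's neighbors in place) with a per-cell gather: build a set of mine coordinates once, then a single sweep over all cells marks a cell 1 iff a mine lies in its 3x3 neighborhood and counts zeros row by row in the same sweep.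
import Mathlib
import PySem

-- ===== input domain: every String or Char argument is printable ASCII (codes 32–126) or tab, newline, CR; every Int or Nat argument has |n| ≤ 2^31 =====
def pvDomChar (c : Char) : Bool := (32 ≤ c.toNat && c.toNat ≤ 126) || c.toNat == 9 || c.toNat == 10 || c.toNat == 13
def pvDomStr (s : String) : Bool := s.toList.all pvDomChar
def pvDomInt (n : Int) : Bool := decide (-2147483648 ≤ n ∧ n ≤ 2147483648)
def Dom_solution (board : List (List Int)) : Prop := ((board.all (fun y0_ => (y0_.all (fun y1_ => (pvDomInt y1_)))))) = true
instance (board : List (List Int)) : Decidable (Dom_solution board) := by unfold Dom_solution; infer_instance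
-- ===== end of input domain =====

-- B replaces A's per-mine scatter marking with one gather sweep over all cells using a
-- set of mine coordinates (alternative decomposition; same final board and count). Both Pythons
-- mutate `board` in place identically; the equivalence proved here is about the return value.

-- ===== PORT A =====
-- scatter: collect `danger` (mine coordinates), then for each of 8 directions mark the
-- shifted cell 1 when in range, then count zeros.
def solution (board : List (List Int)) : Int :=
  let n := board.length
  let danger : List (Nat × Nat) :=
    (List.range n).foldl (fun acc i =>
      (List.range n).foldl (fun acc j =>
        if (board.getD i []).getD j 0 = 1 then acc ++ [(i, j)] else acc) acc) []
  let di : List Int := [-1, -1, -1, 0, 0, 1, 1, 1]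
  let dj : List Int := [-1, 0, 1, -1, 1, -1, 0, 1]
  let board2 :=
    (List.range 8).foldl (fun b p =>
      danger.foldl (fun b xy =>
        let x : Int := (xy.1 : Int) + di.getD p 0
        let y : Int := (xy.2 : Int) + dj.getD p 0
        if 0 ≤ x ∧ x < (n : Int) ∧ 0 ≤ y ∧ y < (n : Int) then
          b.set x.toNat ((b.getD x.toNat []).set y.toNat 1)
        else b) b) board
  board2.foldl (fun acc row => acc + (row.count 0 : Int)) 0

-- ===== PORT B =====
-- gather: set of mines once, then one sweep; a cell becomes 1 iff a mine is in its
-- 3x3 neighborhood, and zeros of each (full) row are counted in the same sweep.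
def solution_alt (board : List (List Int)) : Int :=
  let n := board.length
  let mines : PySem.Set (Int × Int) :=
    (List.range n).foldl (fun s i =>
      (List.range n).foldl (fun s j =>
        if (board.getD i []).getD j 0 = 1 then PySem.Set.add s ((i : Int), (j : Int)) else s) s)
      PySem.Set.empty
  (List.range n).foldl (fun (answer : Int) (i : Nat) =>
    let row :=
      (List.range n).foldl (fun (row : List Int) (j : Nat) =>
        if ([-1, 0, 1] : List Int).any (fun a => ([-1, 0, 1] : List Int).any (fun b =>
            PySem.Set.contains mines ((i : Int) + a, (j : Int) + b))) then
          row.set j 1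
        else row) (board.getD i [])
    answer + (row.count 0 : Int)) 0

-- ===== PRECONDITION & SPEC =====
-- A reads board[i][j] for all i, j < len(board): it raises IndexError iff some row is
-- shorter than the board; Pre_ excludes exactly those inputs.
def Pre_solution (board : List (List Int)) : Prop :=
  ∀ row ∈ board, board.length ≤ row.length
instance (board : List (List Int)) : Decidable (Pre_solution board) := by
  unfold Pre_solution; infer_instance

def pvWitness_solution : List (List Int) := [[1, 0, 0], [0, 0, 0], [0, 0, 0]]

def Spec_solution (board : List (List Int)) (out : Int) : Prop := out = solution_alt board
instance (board : List (List Int)) (out : Int) : Decidable (Spec_solution board out) := by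
  unfold Spec_solution; infer_instance

-- ===== CLAIM (what is proved, stated in full; the proofs are below) =====
def Claim_equal_solution : Prop :=
  ∀ (board : List (List Int)), Dom_solution board → Pre_solution board →
    Spec_solution board (solution board)

-- ===== LEMMAS AND PROOFS =====

-- list-update machinery shared by the two characterizations
def pvUpd (b : List (List Int)) (xy : Nat × Nat) : List (List Int) :=
  b.set xy.1 ((b.getD xy.1 []).set xy.2 1)

def pvSetAll (r : List Int) (L : List Nat) : List Int :=
  L.foldl (fun r y => r.set y 1) r

def pvApply (b : List (List Int)) (L : List (Nat × Nat)) : List (List Int) :=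
  L.foldl pvUpd b

lemma pv_foldl_guard {α β γ : Type} (l : List α) (p : α → Prop) [DecidablePred p]
    (f : α → γ) (g : β → γ → β) (b : β) :
    l.foldl (fun b x => if p x then g b (f x) else b) b
      = (l.filterMap (fun x => if p x then some (f x) else none)).foldl g b := by
  induction l generalizing b with
  | nil => rfl
  | cons x l ih => by_cases h : p x <;> simp [h, ih]

lemma pvUpd_getD (b : List (List Int)) (xy : Nat × Nat) (i : Nat) :
    (pvUpd b xy).getD i [] = if xy.1 = i then (b.getD i []).set xy.2 1 else b.getD i [] := by
  rcases xy with ⟨x, y⟩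
  by_cases h : x = i
  · subst h
    by_cases hl : x < b.length
    · simp [pvUpd, List.getD_eq_getElem?_getD, hl]
    · have h1 : b[x]? = none := by simp; omega
      simp [pvUpd, List.getD_eq_getElem?_getD, hl]
  · simp [pvUpd, List.getD_eq_getElem?_getD, h]

lemma pvApply_length (b : List (List Int)) (L : List (Nat × Nat)) :
    (pvApply b L).length = b.length := by
  induction L generalizing b with
  | nil => rfl
  | cons xy L ih =>
    show (pvApply (pvUpd b xy) L).length = _
    rw [ih]; simp [pvUpd]

lemma pvApply_getD (b : List (List Int)) (L : List (Nat × Nat)) (i : Nat) :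
    (pvApply b L).getD i []
      = pvSetAll (b.getD i []) (L.filterMap (fun xy => if xy.1 = i then some xy.2 else none)) := by
  induction L generalizing b with
  | nil => rfl
  | cons xy L ih =>
    show (pvApply (pvUpd b xy) L).getD i [] = _
    rw [ih, pvUpd_getD]
    by_cases h : xy.1 = i <;> simp [h, pvSetAll]

lemma pvSetAll_length (r : List Int) (L : List Nat) : (pvSetAll r L).length = r.length := by
  induction L generalizing r with
  | nil => rfl
  | cons y L ih =>
    show (pvSetAll (r.set y 1) L).length = _
    rw [ih]; simp

lemma pvSetAll_getElem (r : List Int) (L : List Nat) (j : Nat) (h : j < r.length)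
    (h' : j < (pvSetAll r L).length) :
    (pvSetAll r L)[j] = if j ∈ L then 1 else r[j] := by
  induction L generalizing r with
  | nil => simp [pvSetAll]
  | cons y L ih =>
    have h2 : j < (r.set y 1).length := by simpa
    have := ih (r.set y 1) h2 (by simpa [pvSetAll_length] using h')
    have e : (pvSetAll r (y :: L))[j]'h'
        = (pvSetAll (r.set y 1) L)[j]'(by simpa [pvSetAll_length] using h') := rfl
    rw [e, this, List.getElem_set]
    by_cases hy : j = y <;> by_cases hm : j ∈ L <;> simp [hy, hm]
    omega

-- membership in the guarded-append fold (A's danger list)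
lemma pv_mem_appIf {α β : Type} (l : List α) (p : α → Prop) [DecidablePred p]
    (f : α → β) (acc : List β) (x : β) :
    (x ∈ l.foldl (fun acc a => if p a then acc ++ [f a] else acc) acc)
      ↔ x ∈ acc ∨ ∃ a ∈ l, p a ∧ f a = x := by
  induction l generalizing acc with
  | nil => simp
  | cons a l ih =>
    by_cases h : p a <;> simp [h, ih]
    tauto

lemma pv_mem_danger (board : List (List Int)) (l : List Nat) (acc : List (Nat × Nat))
    (xy : Nat × Nat) :
    (xy ∈ l.foldl (fun acc i => (List.range board.length).foldl (fun acc j =>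
        if (board.getD i []).getD j 0 = 1 then acc ++ [(i, j)] else acc) acc) acc)
      ↔ xy ∈ acc ∨ ∃ x ∈ l, ∃ y < board.length,
          (board.getD x []).getD y 0 = 1 ∧ xy = (x, y) := by
  induction l generalizing acc with
  | nil => simp
  | cons a l ih =>
    rw [List.foldl_cons, ih, pv_mem_appIf]
    simp only [List.mem_range, List.mem_cons]
    constructor
    · rintro ((h | ⟨y, hy, hv, he⟩) | ⟨x, hx, rest⟩)
      · exact Or.inl h
      · exact Or.inr ⟨a, Or.inl rfl, y, hy, hv, he.symm⟩
      · exact Or.inr ⟨x, Or.inr hx, rest⟩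
    · rintro (h | ⟨x, (rfl | hx), y, hy, hv, he⟩)
      · exact Or.inl (Or.inl h)
      · exact Or.inl (Or.inr ⟨y, hy, hv, he.symm⟩)
      · exact Or.inr ⟨x, hx, y, hy, hv, he⟩

-- membership in the guarded Set.add fold (B's mines set)
lemma pv_mem_foldl_addIf {α β : Type} [BEq β] [LawfulBEq β] (l : List α) (p : α → Prop)
    [DecidablePred p] (f : α → β) (s : PySem.Set β) (x : β) :
    (x ∈ l.foldl (fun s a => if p a then PySem.Set.add s (f a) else s) s)
      ↔ x ∈ s ∨ ∃ a ∈ l, p a ∧ f a = x := by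
  induction l generalizing s with
  | nil => simp
  | cons a l ih =>
    by_cases h : p a <;> simp [h, ih, PySem.Set.mem_add]
    tauto

lemma pv_mem_mines (board : List (List Int)) (l : List Nat) (s : PySem.Set (Int × Int))
    (z : Int × Int) :
    (z ∈ l.foldl (fun s i => (List.range board.length).foldl (fun s j =>
        if (board.getD i []).getD j 0 = 1 then PySem.Set.add s ((i : Int), (j : Int)) else s) s) s)
      ↔ z ∈ s ∨ ∃ x ∈ l, ∃ y < board.length,
          (board.getD x []).getD y 0 = 1 ∧ z = ((x : Int), (y : Int)) := by
  induction l generalizing s with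
  | nil => simp
  | cons a l ih =>
    rw [List.foldl_cons, ih, pv_mem_foldl_addIf]
    simp only [List.mem_range, List.mem_cons]
    constructor
    · rintro ((h | ⟨y, hy, hv, he⟩) | ⟨x, hx, rest⟩)
      · exact Or.inl h
      · exact Or.inr ⟨a, Or.inl rfl, y, hy, hv, he.symm⟩
      · exact Or.inr ⟨x, Or.inr hx, rest⟩
    · rintro (h | ⟨x, (rfl | hx), y, hy, hv, he⟩)
      · exact Or.inl (Or.inl h)
      · exact Or.inl (Or.inr ⟨y, hy, hv, he.symm⟩)
      · exact Or.inr ⟨x, hx, y, hy, hv, he⟩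

-- the 8 direction offsets reach exactly the punctured Chebyshev-1 neighborhood
lemma pv_bridge8 (n x y i j : Nat) :
    (∃ p ∈ List.range 8,
        (0 ≤ (x : Int) + ([-1, -1, -1, 0, 0, 1, 1, 1] : List Int).getD p 0
          ∧ (x : Int) + ([-1, -1, -1, 0, 0, 1, 1, 1] : List Int).getD p 0 < (n : Int)
          ∧ 0 ≤ (y : Int) + ([-1, 0, 1, -1, 1, -1, 0, 1] : List Int).getD p 0
          ∧ (y : Int) + ([-1, 0, 1, -1, 1, -1, 0, 1] : List Int).getD p 0 < (n : Int))
        ∧ (((x : Int) + ([-1, -1, -1, 0, 0, 1, 1, 1] : List Int).getD p 0).toNat,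
           ((y : Int) + ([-1, 0, 1, -1, 1, -1, 0, 1] : List Int).getD p 0).toNat) = (i, j))
      ↔ i < n ∧ j < n ∧ ¬(x = i ∧ y = j)
          ∧ x ≤ i + 1 ∧ i ≤ x + 1 ∧ y ≤ j + 1 ∧ j ≤ y + 1 := by
  constructor
  · rintro ⟨p, hp, hc, he⟩
    simp only [List.mem_range] at hp
    rw [Prod.mk.injEq] at he
    interval_cases p <;> simp only [List.getD] at hc he <;> norm_num at hc he <;> omega
  · rintro ⟨hi, hj, hne, h1, h2, h3, h4⟩
    have hx : x = i + 1 ∨ i = x + 1 ∨ x = i := by omega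
    have hy : y = j + 1 ∨ j = y + 1 ∨ y = j := by omega
    rcases hx with hx | hx | hx <;> rcases hy with hy | hy | hy
    · exact ⟨0, by simp, by norm_num [List.getD]; omega⟩
    · exact ⟨2, by simp, by norm_num [List.getD]; omega⟩
    · exact ⟨1, by simp, by norm_num [List.getD]; omega⟩
    · exact ⟨5, by simp, by norm_num [List.getD]; omega⟩
    · exact ⟨7, by simp, by norm_num [List.getD]; omega⟩
    · exact ⟨6, by simp, by norm_num [List.getD]; omega⟩
    · exact ⟨3, by simp, by norm_num [List.getD]; omega⟩
    · exact ⟨4, by simp, by norm_num [List.getD]; omega⟩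
    · exact absurd ⟨hx, hy⟩ hne

-- a ±1/0 offset reaches exactly the Chebyshev-1 interval
lemma pv_bridge9 (x i : Nat) :
    (∃ a : Int, (a = -1 ∨ a = 0 ∨ a = 1) ∧ (i : Int) + a = (x : Int))
      ↔ x ≤ i + 1 ∧ i ≤ x + 1 := by
  constructor
  · rintro ⟨a, ha, h⟩; rcases ha with rfl | rfl | rfl <;> omega
  · intro h
    have h3 : (x : Int) - i = -1 ∨ (x : Int) - i = 0 ∨ (x : Int) - i = 1 := by omega
    rcases h3 with h1 | h1 | h1
    · exact ⟨-1, Or.inl rfl, by omega⟩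
    · exact ⟨0, Or.inr (Or.inl rfl), by omega⟩
    · exact ⟨1, Or.inr (Or.inr rfl), by omega⟩

lemma pv_mem_filterMap_fst (i j : Nat) (U : List (Nat × Nat)) :
    (j ∈ U.filterMap (fun xy => if xy.1 = i then some xy.2 else none)) ↔ (i, j) ∈ U := by
  simp only [List.mem_filterMap]
  constructor
  · rintro ⟨⟨x, y⟩, hxy, he⟩
    by_cases h : x = i
    · subst h
      simp only [Option.some.injEq, if_true] at he
      subst he; exact hxy
    · simp [h] at he
  · intro h; exact ⟨(i, j), h, by simp⟩

-- scatter loop ⇒ one bulk application of its generated updates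
lemma pv_scatter_eq (dang : List (Nat × Nat)) (P : Nat → Nat × Nat → Prop)
    [∀ p xy, Decidable (P p xy)] (F : Nat → Nat × Nat → Nat × Nat) (l : List Nat)
    (b : List (List Int)) :
    l.foldl (fun b p => dang.foldl (fun b xy => if P p xy then pvUpd b (F p xy) else b) b) b
      = pvApply b (l.flatMap (fun p =>
          dang.filterMap (fun xy => if P p xy then some (F p xy) else none))) := by
  induction l generalizing b with
  | nil => rfl
  | cons p l ih =>
    rw [List.foldl_cons, pv_foldl_guard dang (P p) (F p) pvUpd b, ih, List.flatMap_cons]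
    simp [pvApply, List.foldl_append]

-- the final rows agree cellwise: A marks the punctured neighborhood, B the full one,
-- and on the puncture the cell is a mine, so it already holds 1
lemma pv_row_eq (board : List (List Int)) (i : Nat) (LA LB : List Nat)
    (hA : ∀ j, j ∈ LA ↔ j < board.length ∧ ∃ x y : Nat,
        (x < board.length ∧ y < board.length ∧ (board.getD x []).getD y 0 = 1)
          ∧ ¬(x = i ∧ y = j) ∧ x ≤ i + 1 ∧ i ≤ x + 1 ∧ y ≤ j + 1 ∧ j ≤ y + 1)
    (hB : ∀ j, j ∈ LB ↔ j < board.length ∧ ∃ x y : Nat,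
        (x < board.length ∧ y < board.length ∧ (board.getD x []).getD y 0 = 1)
          ∧ x ≤ i + 1 ∧ i ≤ x + 1 ∧ y ≤ j + 1 ∧ j ≤ y + 1) :
    pvSetAll (board.getD i []) LA = pvSetAll (board.getD i []) LB := by
  apply List.ext_getElem (by simp [pvSetAll_length])
  intro j h1 h2
  have hr : j < (board.getD i []).length := by simpa [pvSetAll_length] using h1
  rw [pvSetAll_getElem _ _ _ hr h1, pvSetAll_getElem _ _ _ hr h2]
  by_cases hA' : j ∈ LA
  · have hB' : j ∈ LB := by
      rcases (hA j).1 hA' with ⟨hj, x, y, hm, _, r⟩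
      exact (hB j).2 ⟨hj, x, y, hm, r⟩
    simp [hA', hB']
  · by_cases hB' : j ∈ LB
    · rcases (hB j).1 hB' with ⟨hj, x, y, hm, r1, r2, r3, r4⟩
      by_cases hxy : x = i ∧ y = j
      · obtain ⟨rfl, rfl⟩ := hxy
        have hv : (board.getD x []).getD y 0 = 1 := hm.2.2
        have hval : (board.getD x [])[y] = 1 := by
          rw [List.getD_eq_getElem?_getD, List.getElem?_eq_getElem hr] at hv
          simpa using hv
        simp only [List.getD_eq_getElem?_getD] at hval
        simp [hA', hB', hval]
      · exact absurd ((hA j).2 ⟨hj, x, y, hm, hxy, r1, r2, r3, r4⟩) hA'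
    · simp [hA', hB']

-- ===== VERDICT (by name: the statement is the Claim_ definition above) =====
theorem solution_spec : Claim_equal_solution := by
  intro board _ _
  unfold Spec_solution solution solution_alt
  dsimp only
  have hsc : (List.foldl
        (fun b p =>
          List.foldl
            (fun b xy =>
              if
                  0 ≤ (xy.1 : Int) + ([-1, -1, -1, 0, 0, 1, 1, 1] : List Int).getD p 0 ∧
                    (xy.1 : Int) + ([-1, -1, -1, 0, 0, 1, 1, 1] : List Int).getD p 0 < (board.length : Int) ∧
                      0 ≤ (xy.2 : Int) + ([-1, 0, 1, -1, 1, -1, 0, 1] : List Int).getD p 0 ∧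
                        (xy.2 : Int) + ([-1, 0, 1, -1, 1, -1, 0, 1] : List Int).getD p 0 < (board.length : Int) then
                b.set ((xy.1 : Int) + ([-1, -1, -1, 0, 0, 1, 1, 1] : List Int).getD p 0).toNat
                  ((b.getD ((xy.1 : Int) + ([-1, -1, -1, 0, 0, 1, 1, 1] : List Int).getD p 0).toNat []).set
                    ((xy.2 : Int) + ([-1, 0, 1, -1, 1, -1, 0, 1] : List Int).getD p 0).toNat 1)
              else b)
            b
            (List.foldl
              (fun acc i =>
                List.foldl (fun acc j => if (board.getD i []).getD j 0 = 1 then acc ++ [(i, j)] else acc) acc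
                  (List.range board.length))
              [] (List.range board.length)))
        board (List.range 8)) = pvApply board
      ((List.range 8).flatMap (fun p =>
        (List.foldl
              (fun acc i =>
                List.foldl (fun acc j => if (board.getD i []).getD j 0 = 1 then acc ++ [(i, j)] else acc) acc
                  (List.range board.length))
              [] (List.range board.length)).filterMap (fun xy => if (fun (p : Nat) (xy : Nat × Nat) =>
        0 ≤ (xy.1 : Int) + ([-1, -1, -1, 0, 0, 1, 1, 1] : List Int).getD p 0 ∧
          (xy.1 : Int) + ([-1, -1, -1, 0, 0, 1, 1, 1] : List Int).getD p 0 < (board.length : Int) ∧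
            0 ≤ (xy.2 : Int) + ([-1, 0, 1, -1, 1, -1, 0, 1] : List Int).getD p 0 ∧
              (xy.2 : Int) + ([-1, 0, 1, -1, 1, -1, 0, 1] : List Int).getD p 0 < (board.length : Int)) p xy then some ((fun (p : Nat) (xy : Nat × Nat) =>
        (((xy.1 : Int) + ([-1, -1, -1, 0, 0, 1, 1, 1] : List Int).getD p 0).toNat,
         ((xy.2 : Int) + ([-1, 0, 1, -1, 1, -1, 0, 1] : List Int).getD p 0).toNat)) p xy) else none))) :=
    pv_scatter_eq (List.foldl
              (fun acc i =>
                List.foldl (fun acc j => if (board.getD i []).getD j 0 = 1 then acc ++ [(i, j)] else acc) acc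
                  (List.range board.length))
              [] (List.range board.length))
      (fun (p : Nat) (xy : Nat × Nat) =>
        0 ≤ (xy.1 : Int) + ([-1, -1, -1, 0, 0, 1, 1, 1] : List Int).getD p 0 ∧
          (xy.1 : Int) + ([-1, -1, -1, 0, 0, 1, 1, 1] : List Int).getD p 0 < (board.length : Int) ∧
            0 ≤ (xy.2 : Int) + ([-1, 0, 1, -1, 1, -1, 0, 1] : List Int).getD p 0 ∧
              (xy.2 : Int) + ([-1, 0, 1, -1, 1, -1, 0, 1] : List Int).getD p 0 < (board.length : Int))
      (fun (p : Nat) (xy : Nat × Nat) =>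
        (((xy.1 : Int) + ([-1, -1, -1, 0, 0, 1, 1, 1] : List Int).getD p 0).toNat,
         ((xy.2 : Int) + ([-1, 0, 1, -1, 1, -1, 0, 1] : List Int).getD p 0).toNat))
      (List.range 8) board
  rw [hsc]
  have hrows : pvApply board
      ((List.range 8).flatMap (fun p =>
        (List.foldl
              (fun acc i =>
                List.foldl (fun acc j => if (board.getD i []).getD j 0 = 1 then acc ++ [(i, j)] else acc) acc
                  (List.range board.length))
              [] (List.range board.length)).filterMap (fun xy => if (fun (p : Nat) (xy : Nat × Nat) =>
        0 ≤ (xy.1 : Int) + ([-1, -1, -1, 0, 0, 1, 1, 1] : List Int).getD p 0 ∧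
          (xy.1 : Int) + ([-1, -1, -1, 0, 0, 1, 1, 1] : List Int).getD p 0 < (board.length : Int) ∧
            0 ≤ (xy.2 : Int) + ([-1, 0, 1, -1, 1, -1, 0, 1] : List Int).getD p 0 ∧
              (xy.2 : Int) + ([-1, 0, 1, -1, 1, -1, 0, 1] : List Int).getD p 0 < (board.length : Int)) p xy then some ((fun (p : Nat) (xy : Nat × Nat) =>
        (((xy.1 : Int) + ([-1, -1, -1, 0, 0, 1, 1, 1] : List Int).getD p 0).toNat,
         ((xy.2 : Int) + ([-1, 0, 1, -1, 1, -1, 0, 1] : List Int).getD p 0).toNat)) p xy) else none)))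
      = (List.range board.length).map (fun (i : Nat) =>
          (List.foldl
                (fun (row : List Int) (j : Nat) =>
                  if (([-1, 0, 1] : List Int).any fun a =>
                          ([-1, 0, 1] : List Int).any fun b =>
                            PySem.Set.contains (List.foldl
                  (fun s i =>
                    List.foldl (fun s j => if (board.getD i []).getD j 0 = 1 then PySem.Set.add s ((i : Int), (j : Int)) else s)
                      s (List.range board.length))
                  PySem.Set.empty (List.range board.length)) ((i : Int) + a, (j : Int) + b)) = true then
                    row.set j 1
                  else row)
                (board.getD i []) (List.range board.length))) := by
    apply List.ext_getElem (by simp [pvApply_length])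
    intro i h1 h2
    simp only [List.getElem_map, List.getElem_range]
    have hgd : (pvApply board
        ((List.range 8).flatMap (fun p =>
        (List.foldl
              (fun acc i =>
                List.foldl (fun acc j => if (board.getD i []).getD j 0 = 1 then acc ++ [(i, j)] else acc) acc
                  (List.range board.length))
              [] (List.range board.length)).filterMap (fun xy => if (fun (p : Nat) (xy : Nat × Nat) =>
        0 ≤ (xy.1 : Int) + ([-1, -1, -1, 0, 0, 1, 1, 1] : List Int).getD p 0 ∧
          (xy.1 : Int) + ([-1, -1, -1, 0, 0, 1, 1, 1] : List Int).getD p 0 < (board.length : Int) ∧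
            0 ≤ (xy.2 : Int) + ([-1, 0, 1, -1, 1, -1, 0, 1] : List Int).getD p 0 ∧
              (xy.2 : Int) + ([-1, 0, 1, -1, 1, -1, 0, 1] : List Int).getD p 0 < (board.length : Int)) p xy then some ((fun (p : Nat) (xy : Nat × Nat) =>
        (((xy.1 : Int) + ([-1, -1, -1, 0, 0, 1, 1, 1] : List Int).getD p 0).toNat,
         ((xy.2 : Int) + ([-1, 0, 1, -1, 1, -1, 0, 1] : List Int).getD p 0).toNat)) p xy) else none))))[i]'h1
        = (pvApply board
        ((List.range 8).flatMap (fun p =>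
        (List.foldl
              (fun acc i =>
                List.foldl (fun acc j => if (board.getD i []).getD j 0 = 1 then acc ++ [(i, j)] else acc) acc
                  (List.range board.length))
              [] (List.range board.length)).filterMap (fun xy => if (fun (p : Nat) (xy : Nat × Nat) =>
        0 ≤ (xy.1 : Int) + ([-1, -1, -1, 0, 0, 1, 1, 1] : List Int).getD p 0 ∧
          (xy.1 : Int) + ([-1, -1, -1, 0, 0, 1, 1, 1] : List Int).getD p 0 < (board.length : Int) ∧
            0 ≤ (xy.2 : Int) + ([-1, 0, 1, -1, 1, -1, 0, 1] : List Int).getD p 0 ∧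
              (xy.2 : Int) + ([-1, 0, 1, -1, 1, -1, 0, 1] : List Int).getD p 0 < (board.length : Int)) p xy then some ((fun (p : Nat) (xy : Nat × Nat) =>
        (((xy.1 : Int) + ([-1, -1, -1, 0, 0, 1, 1, 1] : List Int).getD p 0).toNat,
         ((xy.2 : Int) + ([-1, 0, 1, -1, 1, -1, 0, 1] : List Int).getD p 0).toNat)) p xy) else none)))).getD i [] := by
      rw [List.getD_eq_getElem?_getD, List.getElem?_eq_getElem h1]; rfl
    rw [hgd, pvApply_getD]
    have hg : (List.foldl
                (fun (row : List Int) (j : Nat) =>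
                  if (([-1, 0, 1] : List Int).any fun a =>
                          ([-1, 0, 1] : List Int).any fun b =>
                            PySem.Set.contains (List.foldl
                  (fun s i =>
                    List.foldl (fun s j => if (board.getD i []).getD j 0 = 1 then PySem.Set.add s ((i : Int), (j : Int)) else s)
                      s (List.range board.length))
                  PySem.Set.empty (List.range board.length)) ((i : Int) + a, (j : Int) + b)) = true then
                    row.set j 1
                  else row)
                (board.getD i []) (List.range board.length))
        = pvSetAll (board.getD i [])
            ((List.range board.length).filterMap (fun (j : Nat) =>
              if (([-1, 0, 1] : List Int).any fun a =>
                          ([-1, 0, 1] : List Int).any fun b =>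
                            PySem.Set.contains (List.foldl
                  (fun s i =>
                    List.foldl (fun s j => if (board.getD i []).getD j 0 = 1 then PySem.Set.add s ((i : Int), (j : Int)) else s)
                      s (List.range board.length))
                  PySem.Set.empty (List.range board.length)) ((i : Int) + a, (j : Int) + b)) = true then some j else none)) :=
      pv_foldl_guard (List.range board.length)
        (fun j => (([-1, 0, 1] : List Int).any fun a =>
                          ([-1, 0, 1] : List Int).any fun b =>
                            PySem.Set.contains (List.foldl
                  (fun s i =>
                    List.foldl (fun s j => if (board.getD i []).getD j 0 = 1 then PySem.Set.add s ((i : Int), (j : Int)) else s)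
                      s (List.range board.length))
                  PySem.Set.empty (List.range board.length)) ((i : Int) + a, (j : Int) + b)) = true)
        (fun j => j) (fun r y => r.set y 1) (board.getD i [])
    rw [hg]
    apply pv_row_eq
    · -- A-side membership: exactly the punctured Chebyshev-1 neighborhoods of mines
      intro j
      rw [pv_mem_filterMap_fst]
      simp only [List.mem_flatMap, List.mem_filterMap, Option.ite_none_right_eq_some,
        Option.some.injEq]
      constructor
      · rintro ⟨p, hp, ⟨x, y⟩, hxy, hc, ht⟩
        have hd := (pv_mem_danger board (List.range board.length) [] (x, y)).1 hxy
        simp only [List.not_mem_nil, false_or, List.mem_range] at hd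
        obtain ⟨x', hx', y', hy', hv', he'⟩ := hd
        obtain ⟨rfl, rfl⟩ := Prod.mk.injEq .. |>.mp he'
        have h8 := (pv_bridge8 board.length x y i j).1 ⟨p, hp, hc, ht⟩
        exact ⟨h8.2.1, x, y, ⟨hx', hy', hv'⟩, h8.2.2⟩
      · rintro ⟨hj, x, y, hm, hrest⟩
        obtain ⟨p, hp, hc, ht⟩ := (pv_bridge8 board.length x y i j).2
          ⟨by simpa using h2, hj, hrest⟩
        refine ⟨p, hp, (x, y), ?_, hc, ht⟩
        exact (pv_mem_danger board (List.range board.length) [] (x, y)).2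
          (Or.inr ⟨x, by simp [List.mem_range, hm.1], y, hm.2.1, hm.2.2, rfl⟩)
    · -- B-side membership: the full Chebyshev-1 neighborhoods of mines
      intro j
      simp only [List.mem_filterMap, List.mem_range, Option.ite_none_right_eq_some,
        Option.some.injEq, List.any_eq_true, PySem.Set.contains_iff]
      constructor
      · rintro ⟨j', hj', ⟨a, ha, b, hb, hmem⟩, rfl⟩
        have hz := (pv_mem_mines board (List.range board.length) PySem.Set.empty _).1 hmem
        simp only [List.mem_range] at hz
        rcases hz with h0 | ⟨x, hx, y, hy, hv, he⟩
        · cases h0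
        · rw [Prod.mk.injEq] at he
          have c1 := (pv_bridge9 x i).1 ⟨a, by simpa using ha, he.1⟩
          have c2 := (pv_bridge9 y j').1 ⟨b, by simpa using hb, he.2⟩
          exact ⟨hj', x, y, ⟨hx, hy, hv⟩, c1.1, c1.2, c2.1, c2.2⟩
      · rintro ⟨hj, x, y, hm, r1, r2, r3, r4⟩
        obtain ⟨a, ha, hea⟩ := (pv_bridge9 x i).2 ⟨r1, r2⟩
        obtain ⟨b, hb, heb⟩ := (pv_bridge9 y j).2 ⟨r3, r4⟩
        refine ⟨j, hj, ⟨a, by simpa using ha, b, by simpa using hb, ?_⟩, rfl⟩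
        exact (pv_mem_mines board (List.range board.length) PySem.Set.empty _).2
          (Or.inr ⟨x, by simp [List.mem_range, hm.1], y, hm.2.1, hm.2.2, by rw [hea, heb]⟩)
  rw [hrows, List.foldl_map]
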